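-- pv_equiv track=rewrite | github.com/Bilal1512/Projects_Assignments | Assignment3/tutorial03.py | valid_roll
-- ===== SOURCE A (Python) =====
-- def valid_roll(roll_number):
--     for i in range(0,4):
--         if not 48<=ord(roll_number[i])<=57:
--             return False
--     for i in range(4,6):
--         if not 97<=ord(roll_number[i])<=122:
--             return False
--     for i in range(6,8):
--         if not 48<=ord(roll_number[i])<=57:
--             return False
--     return True
-- ===== SOURCE B (Python) =====
-- def _eat(chars, n, lo, hi):
--     """Recursively consume n leading chars with ord in [lo,hi]; remaining list, or None on failure."""
--     if n == 0:
--         return chars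
--     if not chars:
--         return None
--     if lo <= ord(chars[0]) <= hi:
--         return _eat(chars[1:], n - 1, lo, hi)
--     return None
--
-- def valid_roll(roll_number):
--     s = list(roll_number[:8])
--     if len(s) != 8:
--         return False
--     rest = _eat(s, 4, 48, 57)          # four digits
--     if rest is None:
--         return False
--     rest = _eat(rest, 2, 97, 122)      # two lowercase letters
--     if rest is None:
--         return False
--     rest = _eat(rest, 2, 48, 57)       # two digits
--     return rest == []
-- ===== Notes on version B (the rewrite author's own statement) =====
-- stated objective: alternative
-- what changed: Replaces A's three indexed range(..) loops with a recursive-descent parser that consumes the 8-character prefix grammar-style (eat 4 digits, then 2 lowercase, then 2 digits, threading the remaining character list through Option-style failure); Pre_ excludes the short all-valid-prefix strings on which A raises IndexError, where B returns False.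
-- outside the precondition, e.g. on valid_roll('123'): A raises IndexError, B returns False
import Mathlib
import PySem

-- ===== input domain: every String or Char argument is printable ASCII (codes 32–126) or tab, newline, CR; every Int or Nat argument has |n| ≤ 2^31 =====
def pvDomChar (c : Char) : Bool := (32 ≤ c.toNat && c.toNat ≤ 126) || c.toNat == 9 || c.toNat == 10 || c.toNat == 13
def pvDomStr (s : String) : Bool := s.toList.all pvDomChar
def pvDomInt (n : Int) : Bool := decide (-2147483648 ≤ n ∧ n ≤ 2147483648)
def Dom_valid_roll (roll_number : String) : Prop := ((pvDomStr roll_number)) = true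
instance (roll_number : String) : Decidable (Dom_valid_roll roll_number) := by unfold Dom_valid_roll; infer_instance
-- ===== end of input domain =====

-- B re-implements A's three indexed range(..) loops as a recursive-descent parser
-- consuming the 8-character prefix (4 digits, 2 lowercase, 2 digits), threading the
-- remaining character list through Option-style failure (objective: alternative).

-- ===== PORT A =====
-- loopA s lo hi idxs: A's `for i in range(..): if not lo<=ord(s[i])<=hi: return False`;
-- pyGet? = none is Python's IndexError (those inputs are outside Pre_; the port returns false there).
def loopA (s : List Char) (lo hi : Int) : List Int → Bool
  | [] => true
  | i :: restIdx =>
    match PySem.List.pyGet? s i with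
    | none => false
    | some c => if (lo ≤ (c.toNat : Int)) && ((c.toNat : Int) ≤ hi) then loopA s lo hi restIdx else false

def valid_roll (roll_number : String) : Bool :=
  let s := roll_number.toList
  if loopA s 48 57 (PySem.List.pyRange 0 4 1) then
    if loopA s 97 122 (PySem.List.pyRange 4 6 1) then
      loopA s 48 57 (PySem.List.pyRange 6 8 1)
    else false
  else false

-- ===== PORT B =====
-- _eat: recursively consume n leading chars with ord in [lo,hi]; none on failure.
def eatB : List Char → Nat → Int → Int → Option (List Char)
  | cs, 0, _, _ => some cs
  | [], _ + 1, _, _ => none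
  | c :: cs, n + 1, lo, hi =>
    if (lo ≤ (c.toNat : Int)) && ((c.toNat : Int) ≤ hi) then eatB cs n lo hi else none

def valid_roll_alt (roll_number : String) : Bool :=
  let s := PySem.List.slice roll_number.toList none (some 8)   -- list(roll_number[:8])
  if s.length ≠ 8 then false
  else
    match eatB s 4 48 57 with
    | none => false
    | some r1 =>
      match eatB r1 2 97 122 with
      | none => false
      | some r2 =>
        match eatB r2 2 48 57 with
        | none => false
        | some r3 => r3 == ([] : List Char)

-- ===== PRECONDITION & SPEC =====
def posLo (i : Nat) : Int := if i < 4 then 48 else if i < 6 then 97 else 48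
def posHi (i : Nat) : Int := if i < 4 then 57 else if i < 6 then 122 else 57

-- Pre_ excludes exactly the strings shorter than 8 whose present characters all fit the
-- position pattern: there A raises IndexError (returns nothing), while B returns False.
def Pre_valid_roll (roll_number : String) : Prop :=
  ¬ (roll_number.toList.length < 8 ∧ ∀ i < roll_number.toList.length,
      posLo i ≤ ((roll_number.toList.getD i 'a').toNat : Int) ∧
      ((roll_number.toList.getD i 'a').toNat : Int) ≤ posHi i)
instance (roll_number : String) : Decidable (Pre_valid_roll roll_number) := by
  unfold Pre_valid_roll; infer_instance

def pvWitness_valid_roll : String := "1234ab12"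

def Spec_valid_roll (roll_number : String) (out : Bool) : Prop := out = valid_roll_alt roll_number
instance (roll_number : String) (out : Bool) : Decidable (Spec_valid_roll roll_number out) := by
  unfold Spec_valid_roll; infer_instance

-- ===== CLAIM (what is proved, stated in full; the proofs are below) =====
def Claim_equal_valid_roll : Prop := ∀ (roll_number : String), Dom_valid_roll roll_number → Pre_valid_roll roll_number → Spec_valid_roll roll_number (valid_roll roll_number)

-- ===== LEMMAS AND PROOFS =====

theorem ports_agree (s : List Char) :
    (if loopA s 48 57 (PySem.List.pyRange 0 4 1) then
       if loopA s 97 122 (PySem.List.pyRange 4 6 1) then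
         loopA s 48 57 (PySem.List.pyRange 6 8 1)
       else false
     else false)
    =
    (let t := PySem.List.slice s none (some 8)
     if t.length ≠ 8 then false
     else
       match eatB t 4 48 57 with
       | none => false
       | some r1 =>
         match eatB r1 2 97 122 with
         | none => false
         | some r2 =>
           match eatB r2 2 48 57 with
           | none => false
           | some r3 => r3 == ([] : List Char)) := by
  have h04 : PySem.List.pyRange 0 4 1 = [0,1,2,3] := by decide
  have h46 : PySem.List.pyRange 4 6 1 = [4,5] := by decide
  have h68 : PySem.List.pyRange 6 8 1 = [6,7] := by decide
  have hsl : PySem.List.slice s none (some 8) = s.take 8 := by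
    simpa using PySem.List.slice_to_natCast (xs := s) (b := 8)
  rw [h04, h46, h68]
  match s with
  | [] => simp [loopA, PySem.List.pyGet?, PySem.List.pyIdx?, hsl]
  | [a] => simp [loopA, PySem.List.pyGet?, PySem.List.pyIdx?, hsl]
  | [a,b] => simp [loopA, PySem.List.pyGet?, PySem.List.pyIdx?, hsl]
  | [a,b,c] => simp [loopA, PySem.List.pyGet?, PySem.List.pyIdx?, hsl]
  | [a,b,c,d] => simp [loopA, PySem.List.pyGet?, PySem.List.pyIdx?, hsl]
  | [a,b,c,d,e] => simp [loopA, PySem.List.pyGet?, PySem.List.pyIdx?, hsl]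
  | [a,b,c,d,e,f] => simp [loopA, PySem.List.pyGet?, PySem.List.pyIdx?, hsl]
  | [a,b,c,d,e,f,g] => simp [loopA, PySem.List.pyGet?, PySem.List.pyIdx?, hsl]
  | a::b::c::d::e::f::g::h::t =>
    simp only [loopA, hsl]
    rw [show ((0:Int)) = ((0:Nat):Int) by norm_num, PySem.List.pyGet?_natCast]
    rw [show ((1:Int)) = ((1:Nat):Int) by norm_num, PySem.List.pyGet?_natCast]
    rw [show ((2:Int)) = ((2:Nat):Int) by norm_num, PySem.List.pyGet?_natCast]
    rw [show ((3:Int)) = ((3:Nat):Int) by norm_num, PySem.List.pyGet?_natCast]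
    rw [show ((4:Int)) = ((4:Nat):Int) by norm_num, PySem.List.pyGet?_natCast]
    rw [show ((5:Int)) = ((5:Nat):Int) by norm_num, PySem.List.pyGet?_natCast]
    rw [show ((6:Int)) = ((6:Nat):Int) by norm_num, PySem.List.pyGet?_natCast]
    rw [show ((7:Int)) = ((7:Nat):Int) by norm_num, PySem.List.pyGet?_natCast]
    simp [eatB]
    split_ifs <;> simp_all [eatB] <;> split_ifs <;> simp_all [eatB] <;> split_ifs <;> simp_all

-- ===== VERDICT (by name: the statement is the Claim_ definition above) =====
theorem valid_roll_spec : Claim_equal_valid_roll := by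
  intro r _ _
  unfold Spec_valid_roll valid_roll valid_roll_alt
  exact ports_agree r.toList
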